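-- pv_equiv track=rewrite | github.com/DianDian798/TestCaseReduction | TestCaseReduction.py | getInitialTestCaseSetId
-- ===== SOURCE A (Python) =====
-- import copy
--
-- def getInitialTestCaseSetId(resultOfTestCase):
--     """
--     静态方法, 获得最初的测试用例集合ID（保证至少包含一个失败的测试用例）
--     :param resultOfTestCase:
--     :return:
--     """
--     result = [0]
--     size = len(resultOfTestCase)
--     for index in range(1, size):
--         if resultOfTestCase[index] == 1:
--             result.append(index)
--             break
--         else:
--             result.append(index)
--
--     return copy.deepcopy(result)
-- ===== SOURCE B (Python) =====
-- def getInitialTestCaseSetId(resultOfTestCase):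
--     size = len(resultOfTestCase)
--     endpoint = next((i + 1 for i, v in enumerate(resultOfTestCase) if i >= 1 and v == 1), size)
--     return list(range(max(endpoint, 1)))
-- ===== Notes on version B (the rewrite author's own statement) =====
-- stated objective: simpler
-- what changed: Instead of accumulating a list with append inside a break-ing loop and deep-copying it, B computes the single cutoff endpoint (first index >= 1 holding 1, +1; else the length) and builds the result directly as list(range(max(endpoint, 1))), dropping copy.deepcopy.
import Mathlib
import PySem

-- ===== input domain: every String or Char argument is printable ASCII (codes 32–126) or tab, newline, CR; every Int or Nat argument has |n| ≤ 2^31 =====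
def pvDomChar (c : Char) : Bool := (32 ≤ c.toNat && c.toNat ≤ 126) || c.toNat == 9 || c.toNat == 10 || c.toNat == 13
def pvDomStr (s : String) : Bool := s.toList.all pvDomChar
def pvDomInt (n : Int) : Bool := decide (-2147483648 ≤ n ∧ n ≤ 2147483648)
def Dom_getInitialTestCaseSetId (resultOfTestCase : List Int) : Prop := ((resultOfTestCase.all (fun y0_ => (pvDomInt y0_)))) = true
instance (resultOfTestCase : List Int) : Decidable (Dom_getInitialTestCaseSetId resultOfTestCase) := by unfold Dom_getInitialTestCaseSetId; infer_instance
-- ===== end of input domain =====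

-- B replaces A's append-and-break accumulation (plus copy.deepcopy) by computing the
-- single cutoff endpoint and building the result directly as list(range(max(endpoint,1))).

-- ===== PORT A =====
-- the for-loop over range(1, size) with append/break; `acc` is `result`
def pvLoopA (xs : List Int) : List Int → List Int → List Int
  | acc, [] => acc
  | acc, i :: rest =>
    if PySem.List.pyGetD xs i 0 = 1 then acc ++ [i]
    else pvLoopA xs (acc ++ [i]) rest

def getInitialTestCaseSetId (resultOfTestCase : List Int) : List Int :=
  -- result = [0]; for index in range(1, size): …; return deepcopy(result) (deepcopy = identity on a list of ints)
  pvLoopA resultOfTestCase [0] (PySem.List.pyRange 1 (resultOfTestCase.length : Int) 1)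

-- ===== PORT B =====
-- next((i + 1 for i, v in enumerate(xs) if i >= 1 and v == 1), size)
def pvCutB (size : Int) : List (Int × Int) → Int
  | [] => size
  | (i, v) :: rest => if 1 ≤ i ∧ v = 1 then i + 1 else pvCutB size rest

def getInitialTestCaseSetId_alt (resultOfTestCase : List Int) : List Int :=
  let size : Int := resultOfTestCase.length
  let endpoint := pvCutB size (PySem.List.enumerate resultOfTestCase 0)
  PySem.List.pyRange 0 (max endpoint 1) 1

-- ===== PRECONDITION & SPEC =====
def Spec_getInitialTestCaseSetId (resultOfTestCase : List Int) (out : List Int) : Prop := out = getInitialTestCaseSetId_alt resultOfTestCase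
instance (resultOfTestCase : List Int) (out : List Int) : Decidable (Spec_getInitialTestCaseSetId resultOfTestCase out) := by unfold Spec_getInitialTestCaseSetId; infer_instance

-- ===== CLAIM (what is proved, stated in full; the proofs are below) =====
def Claim_equal_getInitialTestCaseSetId : Prop := ∀ (resultOfTestCase : List Int), Dom_getInitialTestCaseSetId resultOfTestCase → Spec_getInitialTestCaseSetId resultOfTestCase (getInitialTestCaseSetId resultOfTestCase)

-- ===== LEMMAS AND PROOFS =====

-- the cutoff never drops below min k size
lemma pvCutB_lb (t : List Int) (k size : Int) :
    min k size ≤ pvCutB size (PySem.List.enumerate t k) := by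
  induction t generalizing k with
  | nil => simp [PySem.List.enumerate_nil, pvCutB]
  | cons v rest ih =>
    rw [PySem.List.enumerate_cons]
    unfold pvCutB
    split_ifs with h
    · omega
    · have := ih (k + 1)
      omega

-- main invariant: from position k ≥ 1 on, A's loop appends exactly pyRange k cut
lemma loopA_eq (xs : List Int) :
    ∀ (t : List Int) (k : Nat) (acc : List Int), xs.drop k = t → 1 ≤ k →
      pvLoopA xs acc (PySem.List.pyRange (k : Int) (xs.length : Int) 1)
        = acc ++ PySem.List.pyRange (k : Int)
            (pvCutB (xs.length : Int) (PySem.List.enumerate t (k : Int))) 1 := by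
  intro t
  induction t with
  | nil =>
    intro k acc hdrop _
    have hk : xs.length ≤ k := List.drop_eq_nil_iff.mp hdrop
    rw [PySem.List.pyRange_one_eq_nil (by exact_mod_cast hk),
        PySem.List.enumerate_nil]
    simp [pvLoopA, pvCutB, PySem.List.pyRange_one_eq_nil (show (xs.length : Int) ≤ k by exact_mod_cast hk)]
  | cons v rest ih =>
    intro k acc hdrop hk
    have hklen : k < xs.length := by
      by_contra h
      rw [List.drop_eq_nil_iff.mpr (by omega)] at hdrop
      exact List.cons_ne_nil v rest hdrop.symm
    have hget : xs[k]? = some v := by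
      have h : (xs.drop k)[0]? = xs[k + 0]? := List.getElem?_drop
      rw [hdrop] at h
      simpa using h.symm
    have hxk : PySem.List.pyGetD xs (k : Int) 0 = v := by
      rw [PySem.List.pyGetD_natCast]
      simp [List.getD, hget]
    have hdrop' : xs.drop (k + 1) = rest := by
      have : xs.drop (k + 1) = (xs.drop k).drop 1 := by
        rw [List.drop_drop]
      rw [this, hdrop]; rfl
    rw [PySem.List.pyRange_one_cons (by exact_mod_cast hklen),
        PySem.List.enumerate_cons]
    unfold pvLoopA pvCutB
    rw [hxk]
    have hcond : ((1:Int) ≤ (k:Int) ∧ v = 1) ↔ v = 1 := by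
      constructor
      · exact fun h => h.2
      · exact fun h => ⟨by exact_mod_cast hk, h⟩
    by_cases hv : v = 1
    · rw [if_pos hv, if_pos (hcond.mpr hv)]
      try rw [PySem.List.pyRange_one_singleton]
    · simp only [if_neg hv, if_neg (fun h => hv (hcond.mp h))]
      have step : ((k:Int) + 1) = ((k + 1 : Nat) : Int) := by push_cast; ring
      rw [step, ih (k + 1) (acc ++ [(k : Int)]) hdrop' (by omega)]
      have hlb := pvCutB_lb rest ((k + 1 : Nat) : Int) (xs.length : Int)
      have hcut : (k : Int) < pvCutB (xs.length : Int) (PySem.List.enumerate rest ((k + 1 : Nat) : Int)) := by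
        have : ((k + 1 : Nat) : Int) ≤ (xs.length : Int) := by exact_mod_cast hklen
        omega
      rw [List.append_assoc]
      congr 1
      rw [PySem.List.pyRange_one_cons hcut]
      try push_cast
      try ring_nf
      try rfl

-- ===== VERDICT (by name: the statement is the Claim_ definition above) =====
theorem getInitialTestCaseSetId_spec : Claim_equal_getInitialTestCaseSetId := by
  intro xs _
  unfold Spec_getInitialTestCaseSetId getInitialTestCaseSetId getInitialTestCaseSetId_alt
  cases xs with
  | nil => decide
  | cons x t =>
    rw [PySem.List.enumerate_cons]
    unfold pvCutB
    have h0 : ¬ ((1:Int) ≤ (0:Int) ∧ x = 1) := by omega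
    simp only [if_neg h0]
    have hlb := pvCutB_lb t ((0:Int) + 1) ((x :: t).length : Int)
    have hlen : (1:Int) ≤ ((x :: t).length : Int) := by simp
    have hcut1 : (1:Int) ≤ pvCutB ((x :: t).length : Int) (PySem.List.enumerate t ((0:Int) + 1)) := by
      omega
    have hcut0 : (0:Int) < pvCutB ((x :: t).length : Int) (PySem.List.enumerate t ((0:Int) + 1)) := by omega
    rw [max_eq_left hcut1, PySem.List.pyRange_one_cons hcut0,
        show ((0:Int) + 1) = 1 from by norm_num]
    have h1 := loopA_eq (x :: t) t 1 [0] rfl (le_refl 1)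
    simp only [Nat.cast_one] at h1
    rw [h1]
    rfl
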